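-- pv_equiv track=rewrite | github.com/leoaragao2406/TecWeb-Handout | Parte1/utils.py | extract_route
-- ===== SOURCE A (Python) =====
-- def extract_route(request):
--     string = ''
--     start = False
--     contagem = 0
--     for i in request:
--         if i == '/'and contagem == 0:
--             start = True
--             contagem = 1
--
--         elif i == ' ':
--             start = False
--
--         elif start:
--             string += i
--     return string
-- ===== SOURCE B (Python) =====
-- def extract_route(request):
--     before, sep, rest = request.partition('/')
--     if not sep:
--         return ''
--     return rest.partition(' ')[0]
-- ===== Notes on version B (the rewrite author's own statement) =====
-- stated objective: simpler
-- what changed: Replaces the char-by-char state machine (start/contagem flags with a growing accumulator) by two str.partition calls computing the boundaries directly: take everything after the first separator and cut it at the first space.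
import Mathlib
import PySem

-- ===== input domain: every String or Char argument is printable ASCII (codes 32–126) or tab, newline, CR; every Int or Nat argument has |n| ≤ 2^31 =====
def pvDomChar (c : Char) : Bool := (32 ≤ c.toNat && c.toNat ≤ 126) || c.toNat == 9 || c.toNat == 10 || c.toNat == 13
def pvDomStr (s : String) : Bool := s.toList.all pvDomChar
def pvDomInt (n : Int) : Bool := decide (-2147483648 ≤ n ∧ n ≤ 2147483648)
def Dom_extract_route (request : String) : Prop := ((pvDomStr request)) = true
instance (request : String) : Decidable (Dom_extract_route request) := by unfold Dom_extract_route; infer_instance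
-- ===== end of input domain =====

-- ===== PORT A =====
-- Literal port of A: fold over the characters with the same state
-- (accumulated string, start flag, contagem counter), branches in A's order.
def pvLoopA : List Char → String → Bool → Nat → String
  | [], acc, _, _ => acc
  | c :: cs, acc, start, cont =>
    if c = '/' ∧ cont = 0 then pvLoopA cs acc true 1
    else if c = ' ' then pvLoopA cs acc false cont
    else if start then pvLoopA cs (acc.push c) start cont
    else pvLoopA cs acc start cont

def extract_route (request : String) : String :=
  pvLoopA request.toList "" false 0

-- ===== PORT B =====
-- Port of B (Source B): request.partition('/') → dropWhile to the first '/'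
-- (empty result = no separator); rest.partition(' ')[0] → takeWhile (≠ ' ').
def extract_route_alt (request : String) : String :=
  match request.toList.dropWhile (· ≠ '/') with
  | [] => ""
  | _ :: rest => String.ofList (rest.takeWhile (· ≠ ' '))

-- ===== PRECONDITION & SPEC =====
def Spec_extract_route (request : String) (out : String) : Prop := out = extract_route_alt request
instance (request : String) (out : String) : Decidable (Spec_extract_route request out) := by unfold Spec_extract_route; infer_instance

-- ===== CLAIM (what is proved, stated in full; the proofs are below) =====
def Claim_equal_extract_route : Prop := ∀ (request : String), Dom_extract_route request → Spec_extract_route request (extract_route request)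

-- ===== LEMMAS AND PROOFS =====

theorem pv_push_cons (acc : String) (c : Char) (l : List Char) :
    (acc.push c) ++ String.ofList l = acc ++ String.ofList (c :: l) := by
  apply String.toList_injective
  simp

-- In state (start = false, contagem = 1) the loop appends nothing more.
theorem pvLoopA_dead (cs : List Char) (acc : String) :
    pvLoopA cs acc false 1 = acc := by
  induction cs generalizing acc with
  | nil => rfl
  | cons c cs ih =>
    simp only [pvLoopA]
    split_ifs with h1 h2 <;> simp_all

-- In state (start = true, contagem = 1) the loop appends the prefix up to the first space.
theorem pvLoopA_run (cs : List Char) (acc : String) :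
    pvLoopA cs acc true 1 = acc ++ String.ofList (cs.takeWhile (· ≠ ' ')) := by
  induction cs generalizing acc with
  | nil => simp [pvLoopA]
  | cons c cs ih =>
    simp only [pvLoopA]
    by_cases hc : c = ' '
    · subst hc
      simp [pvLoopA_dead, List.takeWhile]
    · rw [if_neg (by simp), if_neg hc, if_pos trivial, ih, pv_push_cons]
      have ht : (c :: cs).takeWhile (· ≠ ' ') = c :: cs.takeWhile (· ≠ ' ') := by
        simp [List.takeWhile, hc]
      rw [ht]

-- In the initial state the loop scans to the first '/' and then runs.
theorem pvLoopA_seek (cs : List Char) (acc : String) :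
    pvLoopA cs acc false 0 =
      acc ++ (match cs.dropWhile (· ≠ '/') with
              | [] => ""
              | _ :: rest => String.ofList (rest.takeWhile (· ≠ ' '))) := by
  induction cs generalizing acc with
  | nil => simp [pvLoopA]
  | cons c cs ih =>
    simp only [pvLoopA]
    by_cases hc : c = '/'
    · subst hc
      rw [if_pos (by simp), pvLoopA_run]
      simp [List.dropWhile]
    · rw [if_neg (by simp [hc])]
      have hd : (c :: cs).dropWhile (· ≠ '/') = cs.dropWhile (· ≠ '/') := by
        simp [List.dropWhile, hc]
      by_cases hs : c = ' '
      · rw [if_pos hs, ih, hd]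
      · rw [if_neg hs, if_neg (by simp), ih, hd]

-- ===== VERDICT (by name: the statement is the Claim_ definition above) =====
theorem extract_route_spec : Claim_equal_extract_route := by
  intro request _
  unfold Spec_extract_route extract_route extract_route_alt
  rw [pvLoopA_seek]
  cases h : request.toList.dropWhile (· ≠ '/') <;> simp
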